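-- pv_equiv track=rewrite | github.com/Pikurrot/computational-logic-project | task2.py | count_main_connectors
-- ===== SOURCE A (Python) =====
-- possible_connectors = "&|-%+"  # (and,or,sufficient,necessary,biconditional)
--
-- def count_main_connectors(string):
-- 	# Returns the number of main connectors in a string
-- 	open_parentheses = 0
-- 	count = 0
-- 	for i in range(len(string)):
-- 		if open_parentheses == 0 and string[i] in possible_connectors:
-- 			count += 1
-- 		if string[i] == "(":
-- 			open_parentheses += 1
-- 		elif string[i] == ")":
-- 			open_parentheses -= 1
-- 	return count
-- ===== SOURCE B (Python) =====
-- possible_connectors = "&|-%+"  # (and,or,sufficient,necessary,biconditional)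
--
-- def count_main_connectors(string):
--     # Two-pass decomposition: first build the table of exclusive prefix depths
--     # (depth accumulated strictly BEFORE each character), then count in a
--     # single comprehension the characters seen at depth 0 that are connectors.
--     depths = [0]
--     for c in string:
--         depths.append(depths[-1] + (1 if c == "(" else -1 if c == ")" else 0))
--     return sum(1 for d, c in zip(depths, string) if d == 0 and c in possible_connectors)
-- ===== Notes on version B (the rewrite author's own statement) =====
-- stated objective: alternative
-- what changed: B separates the work into two passes: it first builds an exclusive prefix-depth table of the string, then counts depth-0 connector positions with a comprehension over zip(depths, string), instead of A's single interleaved test-and-update loop with mutable counters.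
import Mathlib
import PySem

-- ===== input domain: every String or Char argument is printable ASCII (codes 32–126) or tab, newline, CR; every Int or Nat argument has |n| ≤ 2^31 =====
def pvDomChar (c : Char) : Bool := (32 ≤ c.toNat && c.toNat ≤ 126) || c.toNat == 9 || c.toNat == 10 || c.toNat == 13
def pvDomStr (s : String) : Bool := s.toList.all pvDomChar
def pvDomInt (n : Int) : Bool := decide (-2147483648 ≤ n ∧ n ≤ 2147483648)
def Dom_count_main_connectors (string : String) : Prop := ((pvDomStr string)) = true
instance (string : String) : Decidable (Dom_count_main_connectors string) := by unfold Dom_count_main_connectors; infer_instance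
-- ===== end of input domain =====

-- B builds an exclusive prefix-depth table first and then counts depth-0 connector
-- positions in a second pass, instead of A's single interleaved loop (alternative decomposition).


-- characters of the module constant possible_connectors = "&|-%+"
def possibleConnectors : List Char := ['&', '|', '-', '%', '+']

-- ===== PORT A =====
-- A's loop over i in range(len(string)) visits the characters in order; state = (open_parentheses, count).
def count_main_connectors (string : String) : Int :=
  (string.toList.foldl
    (fun (st : Int × Int) (c : Char) =>
      let count := if st.1 == 0 && possibleConnectors.contains c then st.2 + 1 else st.2
      let openP := if c == '(' then st.1 + 1 else if c == ')' then st.1 - 1 else st.1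
      (openP, count))
    (0, 0)).2

-- ===== PORT B =====
-- delta of one character: 1 if '(' else -1 if ')' else 0
def pvDelta (c : Char) : Int := if c == '(' then 1 else if c == ')' then -1 else 0

def count_main_connectors_alt (string : String) : Int :=
  let cs := string.toList
  -- first pass: depths table; depths[-1] ported as getLastD (the list is never empty)
  let depths := cs.foldl (fun ds c => ds ++ [ds.getLastD 0 + pvDelta c]) [(0 : Int)]
  -- second pass: sum of the comprehension over zip(depths, string)
  Int.ofNat ((depths.zip cs).filter (fun dc => dc.1 == 0 && possibleConnectors.contains dc.2)).length

-- ===== PRECONDITION & SPEC =====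
def Spec_count_main_connectors (string : String) (out : Int) : Prop := out = count_main_connectors_alt string
instance (string : String) (out : Int) : Decidable (Spec_count_main_connectors string out) := by unfold Spec_count_main_connectors; infer_instance

-- ===== CLAIM (what is proved, stated in full; the proofs are below) =====
def Claim_equal_count_main_connectors : Prop := ∀ (string : String), Dom_count_main_connectors string → Spec_count_main_connectors string (count_main_connectors string)

-- ===== LEMMAS AND PROOFS =====

-- the common reference: count of connectors seen at depth 0, scanning with current depth d
def pvZ (cs : List Char) (d : Int) : Int :=
  match cs with
  | [] => 0
  | c :: cs => (if d == 0 && possibleConnectors.contains c then 1 else 0) + pvZ cs (d + pvDelta c)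

-- the suffix of the depths table produced after prefix depth d
def pvScan (d : Int) (cs : List Char) : List Int :=
  match cs with
  | [] => []
  | c :: cs => (d + pvDelta c) :: pvScan (d + pvDelta c) cs

lemma pvA_fold (cs : List Char) : ∀ (op cnt : Int),
    (cs.foldl
      (fun (st : Int × Int) (c : Char) =>
        let count := if st.1 == 0 && possibleConnectors.contains c then st.2 + 1 else st.2
        let openP := if c == '(' then st.1 + 1 else if c == ')' then st.1 - 1 else st.1
        (openP, count))
      (op, cnt)).2 = cnt + pvZ cs op := by
  induction cs with
  | nil => intro op cnt; simp [pvZ]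
  | cons c cs ih =>
    intro op cnt
    simp only [List.foldl_cons, pvZ]
    rw [ih]
    have h : (if c == '(' then op + 1 else if c == ')' then op - 1 else op) = op + pvDelta c := by
      unfold pvDelta; split_ifs <;> omega
    rw [h]
    split_ifs <;> ring

lemma pvB_fold (cs : List Char) : ∀ (acc : List Int) (d : Int),
    cs.foldl (fun ds c => ds ++ [ds.getLastD 0 + pvDelta c]) (acc ++ [d]) =
      (acc ++ [d]) ++ pvScan d cs := by
  induction cs with
  | nil => intro acc d; simp [pvScan]
  | cons c cs ih =>
    intro acc d
    simp only [List.foldl_cons, pvScan]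
    rw [List.getLastD_concat]
    have := ih (acc ++ [d]) (d + pvDelta c)
    simpa using this

lemma pvB_count (cs : List Char) : ∀ (d : Int),
    Int.ofNat (((d :: pvScan d cs).zip cs).filter
      (fun dc => dc.1 == 0 && possibleConnectors.contains dc.2)).length = pvZ cs d := by
  induction cs with
  | nil => intro d; simp [pvZ]
  | cons c cs ih =>
    intro d
    simp only [pvScan, pvZ, List.zip_cons_cons, List.filter_cons]
    by_cases h : (d == 0 && possibleConnectors.contains c) = true
    · rw [if_pos h, if_pos h, List.length_cons, ← ih (d + pvDelta c)]
      simp only [Int.ofNat_eq_natCast, Nat.cast_add, Nat.cast_one]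
      ring
    · rw [if_neg h, if_neg h, ← ih (d + pvDelta c)]
      simp

-- ===== VERDICT (by name: the statement is the Claim_ definition above) =====
theorem count_main_connectors_spec : Claim_equal_count_main_connectors := by
  intro s _
  unfold Spec_count_main_connectors count_main_connectors count_main_connectors_alt
  rw [pvA_fold]
  have hb := pvB_fold s.toList [] 0
  simp only [List.nil_append] at hb
  show (0 : Int) + pvZ s.toList 0 =
    Int.ofNat (((List.foldl (fun ds c => ds ++ [ds.getLastD 0 + pvDelta c]) [(0 : Int)] s.toList).zip
        s.toList).filter (fun dc => dc.1 == 0 && possibleConnectors.contains dc.2)).length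
  rw [hb]
  simp only [List.singleton_append]
  rw [pvB_count s.toList 0]
  omega
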